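-- pv_equiv track=rewrite | github.com/Awhite1111/gold-rush-roundup | src/project.py | is_wall_pixel
-- ===== SOURCE A (Python) =====
-- TILE   = 40
--
-- COLS   = 19
--
-- ROWS   = 15
--
-- def is_wall_pixel(px, py, maze):
--     margin = 4
--     for cx, cy in [(px+margin, py+margin),(px+TILE-margin, py+margin),
--                    (px+margin, py+TILE-margin),(px+TILE-margin, py+TILE-margin)]:
--         col, row = cx // TILE, cy // TILE
--         if row < 0 or row >= ROWS or col < 0 or col >= COLS:
--             return True
--         if maze[row][col] == 1:
--             return True
--     return False
-- ===== SOURCE B (Python) =====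
-- TILE = 40
-- COLS = 19
-- ROWS = 15
--
-- def is_wall_pixel(px, py, maze):
--     margin = 4
--     col_lo = (px + margin) // TILE
--     col_hi = (px + TILE - margin) // TILE
--     row_lo = (py + margin) // TILE
--     row_hi = (py + TILE - margin) // TILE
--     for row in range(row_lo, row_hi + 1):
--         for col in range(col_lo, col_hi + 1):
--             if row < 0 or row >= ROWS or col < 0 or col >= COLS:
--                 return True
--             if maze[row][col] == 1:
--                 return True
--     return False
-- ===== Notes on version B (the rewrite author's own statement) =====
-- stated objective: alternative
-- what changed: B computes the tile bounding box of the inset pixel region with floor division and scans it with nested range loops, instead of A's four hard-coded corner probes.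
import Mathlib
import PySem

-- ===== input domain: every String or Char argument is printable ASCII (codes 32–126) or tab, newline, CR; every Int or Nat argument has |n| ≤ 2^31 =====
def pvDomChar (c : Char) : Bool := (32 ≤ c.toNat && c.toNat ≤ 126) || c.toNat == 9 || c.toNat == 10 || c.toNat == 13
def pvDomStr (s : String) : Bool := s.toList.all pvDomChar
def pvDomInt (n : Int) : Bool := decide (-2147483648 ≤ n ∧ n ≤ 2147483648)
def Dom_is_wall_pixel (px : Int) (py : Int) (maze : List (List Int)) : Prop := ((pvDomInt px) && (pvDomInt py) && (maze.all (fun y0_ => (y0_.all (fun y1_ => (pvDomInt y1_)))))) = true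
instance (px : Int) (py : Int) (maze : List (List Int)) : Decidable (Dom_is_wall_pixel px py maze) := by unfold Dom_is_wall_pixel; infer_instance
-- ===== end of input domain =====

-- B replaces A's four hard-coded corner probes by a floor-division tile bounding box
-- scanned with nested range loops (objective: alternative decomposition, same cost).
-- Pre_ excludes exactly the inputs where A raises IndexError (a maze too small to index
-- at an in-range corner tile that A's short-circuiting scan actually reaches).

-- ===== PORT A =====
-- the for-loop over the four corner points, with early return
def iwpLoopA (maze : List (List Int)) : List (Int × Int) → Bool
  | [] => false
  | (cx, cy) :: rest =>
    let col := PySem.Int.floordiv cx 40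
    let row := PySem.Int.floordiv cy 40
    if row < 0 ∨ 15 ≤ row ∨ col < 0 ∨ 19 ≤ col then true
    else
      match PySem.List.pyGet? maze row with
      | none => false   -- IndexError: excluded by Pre_
      | some r =>
        match PySem.List.pyGet? r col with
        | none => false   -- IndexError: excluded by Pre_
        | some v => if v = 1 then true else iwpLoopA maze rest

def is_wall_pixel (px : Int) (py : Int) (maze : List (List Int)) : Bool :=
  iwpLoopA maze [(px + 4, py + 4), (px + 40 - 4, py + 4),
                 (px + 4, py + 40 - 4), (px + 40 - 4, py + 40 - 4)]

-- ===== PORT B =====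
-- inner 'for col in range(col_lo, col_hi+1)' loop, with early return
def iwpColsB (maze : List (List Int)) (row : Int) : List Int → Bool
  | [] => false
  | col :: cs =>
    if row < 0 ∨ 15 ≤ row ∨ col < 0 ∨ 19 ≤ col then true
    else
      match PySem.List.pyGet? maze row with
      | none => false   -- IndexError: excluded by Pre_
      | some r =>
        match PySem.List.pyGet? r col with
        | none => false   -- IndexError: excluded by Pre_
        | some v => if v = 1 then true else iwpColsB maze row cs

-- outer 'for row in range(row_lo, row_hi+1)' loop
def iwpRowsB (maze : List (List Int)) (cols : List Int) : List Int → Bool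
  | [] => false
  | row :: rs => if iwpColsB maze row cols then true else iwpRowsB maze cols rs

def is_wall_pixel_alt (px : Int) (py : Int) (maze : List (List Int)) : Bool :=
  let col_lo := PySem.Int.floordiv (px + 4) 40
  let col_hi := PySem.Int.floordiv (px + 40 - 4) 40
  let row_lo := PySem.Int.floordiv (py + 4) 40
  let row_hi := PySem.Int.floordiv (py + 40 - 4) 40
  iwpRowsB maze (PySem.List.pyRange col_lo (col_hi + 1) 1)
               (PySem.List.pyRange row_lo (row_hi + 1) 1)

-- ===== PRECONDITION & SPEC =====
abbrev pvOob (row col : Int) : Prop := row < 0 ∨ 15 ≤ row ∨ col < 0 ∨ 19 ≤ col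
abbrev pvCell (maze : List (List Int)) (row col : Int) : Option Int :=
  (PySem.List.pyGet? maze row).bind (fun r => PySem.List.pyGet? r col)
-- the tile can be inspected without an IndexError (or is out of range, which A handles itself)
abbrev pvOk (maze : List (List Int)) (row col : Int) : Prop :=
  pvOob row col ∨ (pvCell maze row col).isSome = true
-- A returns True at this tile (out of range, or a wall)
abbrev pvStop (maze : List (List Int)) (row col : Int) : Prop :=
  pvOob row col ∨ pvCell maze row col = some 1

-- Pre_ excludes exactly the inputs on which A raises IndexError: each corner tile that
-- A's short-circuiting scan reaches must be inspectable.
def Pre_is_wall_pixel (px : Int) (py : Int) (maze : List (List Int)) : Prop :=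
  pvOk maze (PySem.Int.floordiv (py + 4) 40) (PySem.Int.floordiv (px + 4) 40) ∧
  (¬ pvStop maze (PySem.Int.floordiv (py + 4) 40) (PySem.Int.floordiv (px + 4) 40) →
    pvOk maze (PySem.Int.floordiv (py + 4) 40) (PySem.Int.floordiv (px + 40 - 4) 40) ∧
    (¬ pvStop maze (PySem.Int.floordiv (py + 4) 40) (PySem.Int.floordiv (px + 40 - 4) 40) →
      pvOk maze (PySem.Int.floordiv (py + 40 - 4) 40) (PySem.Int.floordiv (px + 4) 40) ∧
      (¬ pvStop maze (PySem.Int.floordiv (py + 40 - 4) 40) (PySem.Int.floordiv (px + 4) 40) →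
        pvOk maze (PySem.Int.floordiv (py + 40 - 4) 40) (PySem.Int.floordiv (px + 40 - 4) 40))))

instance (px : Int) (py : Int) (maze : List (List Int)) : Decidable (Pre_is_wall_pixel px py maze) := by
  unfold Pre_is_wall_pixel; infer_instance

def pvWitness_is_wall_pixel : Int × Int × List (List Int) := (0, 0, [[0]])

def Spec_is_wall_pixel (px : Int) (py : Int) (maze : List (List Int)) (out : Bool) : Prop := out = is_wall_pixel_alt px py maze
instance (px : Int) (py : Int) (maze : List (List Int)) (out : Bool) : Decidable (Spec_is_wall_pixel px py maze out) := by unfold Spec_is_wall_pixel; infer_instance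

-- ===== CLAIM (what is proved, stated in full; the proofs are below) =====
def Claim_equal_is_wall_pixel : Prop := ∀ (px : Int) (py : Int) (maze : List (List Int)), Dom_is_wall_pixel px py maze → Pre_is_wall_pixel px py maze → Spec_is_wall_pixel px py maze (is_wall_pixel px py maze)

-- ===== LEMMAS AND PROOFS =====

lemma pvWitness_ok :
    Dom_is_wall_pixel (pvWitness_is_wall_pixel.1) (pvWitness_is_wall_pixel.2.1) (pvWitness_is_wall_pixel.2.2) ∧
    Pre_is_wall_pixel (pvWitness_is_wall_pixel.1) (pvWitness_is_wall_pixel.2.1) (pvWitness_is_wall_pixel.2.2) := by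
  decide

lemma stepA (maze : List (List Int)) (cx cy : Int) (rest : List (Int × Int))
    (h : pvOk maze (PySem.Int.floordiv cy 40) (PySem.Int.floordiv cx 40)) :
    iwpLoopA maze ((cx, cy) :: rest)
      = (decide (pvStop maze (PySem.Int.floordiv cy 40) (PySem.Int.floordiv cx 40))
          || iwpLoopA maze rest) := by
  have e1 : PySem.Int.floordiv cx 40 = cx / 40 := PySem.Int.floordiv_eq_ediv_of_pos (by norm_num)
  have e2 : PySem.Int.floordiv cy 40 = cy / 40 := PySem.Int.floordiv_eq_ediv_of_pos (by norm_num)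
  rw [e1, e2] at h ⊢
  by_cases hoob : pvOob (cy / 40) (cx / 40)
  · simp [iwpLoopA, pvStop, hoob]
  · rcases h with h | hsome
    · exact absurd h hoob
    rcases hr : PySem.List.pyGet? maze (cy / 40) with _ | r
    · simp [pvCell, hr] at hsome
    rcases hc : PySem.List.pyGet? r (cx / 40) with _ | v
    · simp [pvCell, hr, hc] at hsome
    by_cases hv : v = 1 <;>
      simp [iwpLoopA, pvStop, pvCell, pvOob, hr, hc, hv, hoob]

lemma stepB (maze : List (List Int)) (row col : Int) (cs : List Int)
    (h : pvOk maze row col) :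
    iwpColsB maze row (col :: cs)
      = (decide (pvStop maze row col) || iwpColsB maze row cs) := by
  by_cases hoob : pvOob row col
  · simp [iwpColsB, pvStop, hoob]
  · rcases h with h | hsome
    · exact absurd h hoob
    rcases hr : PySem.List.pyGet? maze row with _ | r
    · simp [pvCell, hr] at hsome
    rcases hc : PySem.List.pyGet? r col with _ | v
    · simp [pvCell, hr, hc] at hsome
    by_cases hv : v = 1 <;>
      simp [iwpColsB, pvStop, pvCell, pvOob, hr, hc, hv, hoob]

lemma quad (maze : List (List Int)) (rl cl rh ch cx1 cy1 cx2 cy2 : Int)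
    (e1 : PySem.Int.floordiv cx1 40 = cl) (e2 : PySem.Int.floordiv cx2 40 = ch)
    (e3 : PySem.Int.floordiv cy1 40 = rl) (e4 : PySem.Int.floordiv cy2 40 = rh)
    (hr1 : rl ≤ rh) (hr2 : rh ≤ rl + 1) (hc1 : cl ≤ ch) (hc2 : ch ≤ cl + 1)
    (ok1 : pvOk maze rl cl)
    (chain : ¬pvStop maze rl cl → pvOk maze rl ch ∧ (¬pvStop maze rl ch →
      pvOk maze rh cl ∧ (¬pvStop maze rh cl → pvOk maze rh ch))) :
    iwpLoopA maze [(cx1, cy1), (cx2, cy1), (cx1, cy2), (cx2, cy2)]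
      = iwpRowsB maze (PySem.List.pyRange cl (ch + 1) 1) (PySem.List.pyRange rl (rh + 1) 1) := by
  have loopNil : iwpLoopA maze [] = false := rfl
  have colsNil : ∀ row : Int, iwpColsB maze row [] = false := fun _ => rfl
  have rowsNil : ∀ cols, iwpRowsB maze cols [] = false := fun _ => rfl
  have A1 : ∀ rest, iwpLoopA maze ((cx1, cy1) :: rest)
      = (decide (pvStop maze rl cl) || iwpLoopA maze rest) := by
    intro rest
    have h := stepA maze cx1 cy1 rest (by rw [e3, e1]; exact ok1)
    rwa [e3, e1] at h
  have B1 : ∀ cs, iwpColsB maze rl (cl :: cs) = (decide (pvStop maze rl cl) || iwpColsB maze rl cs) :=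
    fun cs => stepB maze rl cl cs ok1
  rw [PySem.List.pyRange_one_cons (show rl < rh + 1 by omega),
      PySem.List.pyRange_one_cons (show cl < ch + 1 by omega)]
  by_cases s1 : pvStop maze rl cl
  · simp [A1, iwpRowsB, B1, s1]
  obtain ⟨ok2, chain2⟩ := chain s1
  have A2 : ∀ rest, iwpLoopA maze ((cx2, cy1) :: rest)
      = (decide (pvStop maze rl ch) || iwpLoopA maze rest) := by
    intro rest
    have h := stepA maze cx2 cy1 rest (by rw [e3, e2]; exact ok2)
    rwa [e3, e2] at h
  have B2 : ∀ cs, iwpColsB maze rl (ch :: cs) = (decide (pvStop maze rl ch) || iwpColsB maze rl cs) :=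
    fun cs => stepB maze rl ch cs ok2
  by_cases s2 : pvStop maze rl ch
  · have hne : ch ≠ cl := fun h => s1 (h ▸ s2)
    have tcols : PySem.List.pyRange (cl + 1) (ch + 1) 1 = [ch] := by
      rw [show ch = cl + 1 by omega]; exact PySem.List.pyRange_one_singleton _
    simp [A1, A2, iwpRowsB, B1, B2, tcols, s1, s2]
  obtain ⟨ok3, chain3⟩ := chain2 s2
  have A3 : ∀ rest, iwpLoopA maze ((cx1, cy2) :: rest)
      = (decide (pvStop maze rh cl) || iwpLoopA maze rest) := by
    intro rest
    have h := stepA maze cx1 cy2 rest (by rw [e4, e1]; exact ok3)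
    rwa [e4, e1] at h
  have B3 : ∀ cs, iwpColsB maze rh (cl :: cs) = (decide (pvStop maze rh cl) || iwpColsB maze rh cs) :=
    fun cs => stepB maze rh cl cs ok3
  by_cases s3 : pvStop maze rh cl
  · have hne : rh ≠ rl := fun h => s1 (h ▸ s3)
    have trows : PySem.List.pyRange (rl + 1) (rh + 1) 1 = [rh] := by
      rw [show rh = rl + 1 by omega]; exact PySem.List.pyRange_one_singleton _
    by_cases hch : ch = cl
    · have tcols : PySem.List.pyRange (cl + 1) (ch + 1) 1 = [] :=
        PySem.List.pyRange_one_eq_nil (by omega)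
      simp [A1, A2, A3, iwpRowsB, B1, B3, trows, tcols, s1, s2, s3, colsNil]
    · have tcols : PySem.List.pyRange (cl + 1) (ch + 1) 1 = [ch] := by
        rw [show ch = cl + 1 by omega]; exact PySem.List.pyRange_one_singleton _
      simp [A1, A2, A3, iwpRowsB, B1, B2, B3, trows, tcols, s1, s2, s3, colsNil]
  obtain ok4 := chain3 s3
  have A4 : ∀ rest, iwpLoopA maze ((cx2, cy2) :: rest)
      = (decide (pvStop maze rh ch) || iwpLoopA maze rest) := by
    intro rest
    have h := stepA maze cx2 cy2 rest (by rw [e4, e2]; exact ok4)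
    rwa [e4, e2] at h
  have B4 : ∀ cs, iwpColsB maze rh (ch :: cs) = (decide (pvStop maze rh ch) || iwpColsB maze rh cs) :=
    fun cs => stepB maze rh ch cs ok4
  by_cases s4 : pvStop maze rh ch
  · have hner : rh ≠ rl := fun h => s2 (h ▸ s4)
    have hnec : ch ≠ cl := fun h => s3 (h ▸ s4)
    have trows : PySem.List.pyRange (rl + 1) (rh + 1) 1 = [rh] := by
      rw [show rh = rl + 1 by omega]; exact PySem.List.pyRange_one_singleton _
    have tcols : PySem.List.pyRange (cl + 1) (ch + 1) 1 = [ch] := by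
      rw [show ch = cl + 1 by omega]; exact PySem.List.pyRange_one_singleton _
    simp [A1, A2, A3, A4, iwpRowsB, B1, B2, B3, B4, trows, tcols, s1, s2, s3, s4, colsNil]
  · by_cases hch : ch = cl <;> by_cases hrh : rh = rl
    · have tcols : PySem.List.pyRange (cl + 1) (ch + 1) 1 = [] :=
        PySem.List.pyRange_one_eq_nil (by omega)
      have trows : PySem.List.pyRange (rl + 1) (rh + 1) 1 = [] :=
        PySem.List.pyRange_one_eq_nil (by omega)
      simp [A1, A2, A3, A4, iwpRowsB, B1, trows, tcols, s1, s2, s3, s4, colsNil, rowsNil, loopNil]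
    · have tcols : PySem.List.pyRange (cl + 1) (ch + 1) 1 = [] :=
        PySem.List.pyRange_one_eq_nil (by omega)
      have trows : PySem.List.pyRange (rl + 1) (rh + 1) 1 = [rh] := by
        rw [show rh = rl + 1 by omega]; exact PySem.List.pyRange_one_singleton _
      simp [A1, A2, A3, A4, iwpRowsB, B1, B3, trows, tcols, s1, s2, s3, s4, colsNil, loopNil]
    · have tcols : PySem.List.pyRange (cl + 1) (ch + 1) 1 = [ch] := by
        rw [show ch = cl + 1 by omega]; exact PySem.List.pyRange_one_singleton _
      have trows : PySem.List.pyRange (rl + 1) (rh + 1) 1 = [] :=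
        PySem.List.pyRange_one_eq_nil (by omega)
      simp [A1, A2, A3, A4, iwpRowsB, B1, B2, trows, tcols, s1, s2, s3, s4, colsNil, loopNil]
    · have tcols : PySem.List.pyRange (cl + 1) (ch + 1) 1 = [ch] := by
        rw [show ch = cl + 1 by omega]; exact PySem.List.pyRange_one_singleton _
      have trows : PySem.List.pyRange (rl + 1) (rh + 1) 1 = [rh] := by
        rw [show rh = rl + 1 by omega]; exact PySem.List.pyRange_one_singleton _
      simp [A1, A2, A3, A4, iwpRowsB, B1, B2, B3, B4, trows, tcols, s1, s2, s3, s4, colsNil, loopNil]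

lemma main_eq (px py : Int) (maze : List (List Int)) (hpre : Pre_is_wall_pixel px py maze) :
    is_wall_pixel px py maze = is_wall_pixel_alt px py maze := by
  have ecl : PySem.Int.floordiv (px + 4) 40 = (px + 4) / 40 := PySem.Int.floordiv_eq_ediv_of_pos (by norm_num)
  have ech : PySem.Int.floordiv (px + 40 - 4) 40 = (px + 40 - 4) / 40 := PySem.Int.floordiv_eq_ediv_of_pos (by norm_num)
  have erl : PySem.Int.floordiv (py + 4) 40 = (py + 4) / 40 := PySem.Int.floordiv_eq_ediv_of_pos (by norm_num)
  have erh : PySem.Int.floordiv (py + 40 - 4) 40 = (py + 40 - 4) / 40 := PySem.Int.floordiv_eq_ediv_of_pos (by norm_num)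
  obtain ⟨ok1, chain⟩ := hpre
  exact quad maze _ _ _ _ _ _ _ _ rfl rfl rfl rfl
    (by rw [erl, erh]; omega) (by rw [erl, erh]; omega)
    (by rw [ecl, ech]; omega) (by rw [ecl, ech]; omega)
    ok1 chain

-- ===== VERDICT (by name: the statement is the Claim_ definition above) =====
theorem is_wall_pixel_spec : Claim_equal_is_wall_pixel := by
  intro px py maze _ hpre
  unfold Spec_is_wall_pixel
  exact main_eq px py maze hpre
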